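-- pv_equiv track=rewrite | github.com/ehc32/Translate-Git | Translate Sin Comentarios/009/translate009.py | _fn_amount_normalize
-- ===== SOURCE A (Python) =====
-- def _fn_amount_normalize(raw: str) -> str:
--     if raw is None:
--         return ""
--     s = "".join(ch for ch in str(raw).strip() if ch.isdigit() or ch in ",.")
--     if not s:
--         return ""
--
--     has_comma = "," in s
--     has_dot = "." in s
--
--     def _assemble(int_part: str, dec_part: str) -> str:
--         int_part = "".join(ch for ch in int_part if ch.isdigit())
--         dec_part = "".join(ch for ch in dec_part if ch.isdigit())
--         if not int_part:
--             int_part = "0"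
--
--         if dec_part == "":
--             dec_part = "00"
--
--         return f"{int_part}.{dec_part}"
--
--     if has_comma and has_dot:
--         last_comma = s.rfind(",")
--         last_dot = s.rfind(".")
--         dec_sep = "," if last_comma > last_dot else "."
--         idx = s.rfind(dec_sep)
--         int_part = s[:idx]
--         dec_part = s[idx + 1 :]
--         int_part = int_part.replace(",", "").replace(".", "")
--         return _assemble(int_part, dec_part)
--
--     if has_comma and not has_dot:
--         parts = s.split(",")
--         if len(parts) > 2:
--             int_part = s.replace(",", "")
--             return _assemble(int_part, "")
--         left, right = parts[0], parts[1]
--         if len(right) == 3 and right.isdigit():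
--             int_part = left + right  # p.ej. "1,234" -> "1234"
--             return _assemble(int_part, "")
--         int_part = left.replace(",", "")
--         return _assemble(int_part, right)
--
--     if has_dot and not has_comma:
--         parts = s.split(".")
--         if len(parts) > 2:
--             int_part = s.replace(".", "")
--             return _assemble(int_part, "")
--         left, right = parts[0], parts[1]
--         if len(right) == 3 and right.isdigit():
--             int_part = left + right
--             return _assemble(int_part, "")
--         return _assemble(left, right)
--
--     return _assemble(s, "")
-- ===== SOURCE B (Python) =====
-- def _fn_amount_normalize(raw: str) -> str:
--     if raw is None:
--         return ""
--     s = "".join(ch for ch in str(raw).strip() if ch.isdigit() or ch in ",.")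
--     if not s:
--         return ""
--     # B never splits s: it projects out the digit string once, measures the
--     # trailing digit run, and decides how many of the last digits are decimals.
--     digits = "".join(ch for ch in s if ch.isdigit())
--     tail = 0
--     for ch in reversed(s):
--         if not ch.isdigit():
--             break
--         tail += 1
--     nc = s.count(",")
--     nd = s.count(".")
--     if nc > 0 and nd > 0:
--         k = tail
--     elif nc + nd == 1 and tail != 3:
--         k = tail
--     else:
--         k = 0
--     cut = len(digits) - k
--     return (digits[:cut] or "0") + "." + (digits[cut:] or "00")
-- ===== Notes on version B (the rewrite author's own statement) =====
-- stated objective: alternative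
-- what changed: A splits/slices the sanitized string at a separator in four independent branches; B never splits s: it projects the digit-only string once, measures the trailing digit run and the separator counts, derives how many final digits are decimals (k), and cuts the digit string at len-k.
import Mathlib
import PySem

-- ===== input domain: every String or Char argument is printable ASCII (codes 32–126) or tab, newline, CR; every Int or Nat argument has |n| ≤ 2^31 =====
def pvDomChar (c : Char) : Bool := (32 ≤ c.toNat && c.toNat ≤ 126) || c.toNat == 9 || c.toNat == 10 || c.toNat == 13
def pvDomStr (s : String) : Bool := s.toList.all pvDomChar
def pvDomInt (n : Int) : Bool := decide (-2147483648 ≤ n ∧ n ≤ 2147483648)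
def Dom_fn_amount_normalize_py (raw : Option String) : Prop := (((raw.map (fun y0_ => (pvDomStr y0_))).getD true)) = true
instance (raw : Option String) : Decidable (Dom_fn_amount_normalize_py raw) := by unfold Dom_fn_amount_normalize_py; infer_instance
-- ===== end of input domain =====

set_option maxRecDepth 4000


-- B replaces A's four split/slice branches by a digit-projection-and-cut computation:
-- it builds the digit-only string once, measures the trailing digit run and the
-- separator counts, and cuts the digit string; same cost, different decomposition.

-- ===== PORT A =====
-- keep only digits, ',' and '.' (Python: ch.isdigit() or ch in ",.")
def pvNumChar (c : Char) : Bool := PySem.Chars.isdigit c || c == ',' || c == '.'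

-- Python helper _assemble
def pvAssemble (intPart decPart : List Char) : String :=
  let ip := intPart.filter PySem.Chars.isdigit
  let dp := decPart.filter PySem.Chars.isdigit
  let ip := if ip = [] then ['0'] else ip
  let dp := if dp = [] then ['0', '0'] else dp
  String.mk (ip ++ '.' :: dp)

-- the body of A after `s = …` (on the filtered character list)
def pvACore (s : List Char) : String :=
  if s = [] then "" else
  let hasComma := PySem.Chars.isIn [','] s
  let hasDot := PySem.Chars.isIn ['.'] s
  if hasComma && hasDot then
    let lastComma := PySem.Chars.rfind s [',']
    let lastDot := PySem.Chars.rfind s ['.']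
    let decSep : List Char := if lastDot < lastComma then [','] else ['.']
    let idx := PySem.Chars.rfind s decSep
    let intPart := PySem.List.slice s none (some idx)
    let decPart := PySem.List.slice s (some (idx + 1)) none
    pvAssemble (PySem.Chars.replace (PySem.Chars.replace intPart [','] []) ['.'] []) decPart
  else if hasComma && !hasDot then
    let parts := PySem.Chars.splitOn s [',']
    if 2 < parts.length then
      pvAssemble (PySem.Chars.replace s [','] []) []
    else
      -- parts has exactly 2 entries here (a comma is present), so parts[0]/parts[1] cannot raise
      let left := parts.getD 0 []
      let right := parts.getD 1 []
      if right.length == 3 && PySem.Chars.strIsdigit right then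
        pvAssemble (left ++ right) []
      else
        pvAssemble (PySem.Chars.replace left [','] []) right
  else if hasDot && !hasComma then
    let parts := PySem.Chars.splitOn s ['.']
    if 2 < parts.length then
      pvAssemble (PySem.Chars.replace s ['.'] []) []
    else
      let left := parts.getD 0 []
      let right := parts.getD 1 []
      if right.length == 3 && PySem.Chars.strIsdigit right then
        pvAssemble (left ++ right) []
      else
        pvAssemble left right
  else
    pvAssemble s []

def fn_amount_normalize_py (raw : Option String) : String :=
  match raw with
  | none => ""
  | some r => pvACore ((PySem.Chars.strip r.toList).filter pvNumChar)

-- ===== PORT B =====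
-- Python: `tail = 0; for ch in reversed(s): if not ch.isdigit(): break; tail += 1`
-- ported as a structural recursion over the reversed list
def pvTail : List Char → Nat
  | [] => 0
  | c :: t => if PySem.Chars.isdigit c then pvTail t + 1 else 0

-- the body of B after `s = …`: project the digit string, decide k, cut it
def pvBCore (s : List Char) : String :=
  if s = [] then "" else
  let digits := s.filter PySem.Chars.isdigit
  let tail := pvTail s.reverse
  let nc := PySem.Chars.count s [',']
  let nd := PySem.Chars.count s ['.']
  let k := if 0 < nc ∧ 0 < nd then tail
           else if nc + nd = 1 ∧ tail ≠ 3 then tail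
           else 0
  -- Python digits[:cut] / digits[cut:] with 0 ≤ cut ≤ len(digits) (k ≤ tail ≤ #digits): exactly take/drop
  let cut := digits.length - k
  let ip := digits.take cut
  let dp := digits.drop cut
  String.mk ((if ip = [] then ['0'] else ip) ++ '.' :: (if dp = [] then ['0', '0'] else dp))

def fn_amount_normalize_py_alt (raw : Option String) : String :=
  match raw with
  | none => ""
  | some r => pvBCore ((PySem.Chars.strip r.toList).filter pvNumChar)

-- ===== PRECONDITION & SPEC =====
def Spec_fn_amount_normalize_py (raw : Option String) (out : String) : Prop := out = fn_amount_normalize_py_alt raw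
instance (raw : Option String) (out : String) : Decidable (Spec_fn_amount_normalize_py raw out) := by unfold Spec_fn_amount_normalize_py; infer_instance

-- ===== CLAIM (what is proved, stated in full; the proofs are below) =====
def Claim_equal_fn_amount_normalize_py : Prop := ∀ (raw : Option String), Dom_fn_amount_normalize_py raw → Spec_fn_amount_normalize_py raw (fn_amount_normalize_py raw)

-- ===== LEMMAS AND PROOFS =====

lemma pvPrefixSingleton (c : Char) (l : List Char) : ([c].isPrefixOf l) = (l[0]? == some c) := by
  cases l with
  | nil => rfl
  | cons x t =>
      show (c == x && List.isPrefixOf [] t) = (some x == some c)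
      rw [List.isPrefixOf_nil_left, Bool.and_true]
      by_cases hcx : c = x
      · subst hcx; simp
      · simp [hcx, Ne.symm hcx]

def pvR (c : Char) (s : List Char) : Nat → Int
  | 0 => if s[0]? = some c then 0 else -1
  | j+1 => if s[(j+1)]? = some c then ((j+1 : Nat) : Int) else pvR c s j

lemma pvGo_eq (c : Char) (s : List Char) (j : Nat) : PySem.Chars.rfind.go s [c] j = pvR c s j := by
  induction j with
  | zero => simp [PySem.Chars.rfind.go, pvR, pvPrefixSingleton]
  | succ j ih =>
      rw [PySem.Chars.rfind.go]
      simp only [pvR, pvPrefixSingleton]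
      rw [show (List.drop (j+1) s)[0]? = s[(j+1)]? by simp]
      split <;> simp_all [beq_iff_eq]

lemma pvR_spec (c : Char) (s : List Char) (j : Nat) :
    (pvR c s j = -1 ∧ ∀ i ≤ j, s[i]? ≠ some c) ∨
    (∃ i : Nat, i ≤ j ∧ pvR c s j = (i : Int) ∧ s[i]? = some c ∧ ∀ k, i < k → k ≤ j → s[k]? ≠ some c) := by
  induction j with
  | zero =>
      by_cases h : s[0]? = some c
      · right; exact ⟨0, le_refl _, by simp [pvR, h], h, by omega⟩
      · left; exact ⟨by simp [pvR, h], by intro i hi; interval_cases i; exact h⟩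
  | succ j ih =>
      by_cases h : s[(j+1)]? = some c
      · right; exact ⟨j+1, le_refl _, by simp [pvR, h], h, by omega⟩
      · rcases ih with ⟨h1, h2⟩ | ⟨i, hi, h1, h2, h3⟩
        · left
          refine ⟨by simp [pvR, h, h1], ?_⟩
          intro i hij
          rcases Nat.lt_or_ge i (j+1) with hlt | hge
          · exact h2 i (by omega)
          · have : i = j+1 := by omega
            subst this; exact h
        · right
          refine ⟨i, by omega, by simp [pvR, h, h1], h2, ?_⟩
          intro k hk1 hk2
          rcases Nat.lt_or_ge k (j+1) with hlt | hge
          · exact h3 k hk1 (by omega)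
          · have : k = j+1 := by omega
            subst this; exact h

lemma pvRfind_mem (c : Char) (s : List Char) (h : c ∈ s) :
    ∃ n : Nat, PySem.Chars.rfind s [c] = (n : Int) ∧ s[n]? = some c ∧ ∀ k, n < k → s[k]? ≠ some c := by
  unfold PySem.Chars.rfind
  rw [pvGo_eq]
  rcases pvR_spec c s s.length with ⟨_, h2⟩ | ⟨i, _, h1, h2, h3⟩
  · obtain ⟨n, hn, he⟩ := List.getElem_of_mem h
    exact absurd (by rw [List.getElem?_eq_getElem hn, he]) (h2 n (by omega))
  · refine ⟨i, h1, h2, fun k hk1 hk2 => ?_⟩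
    rcases Nat.lt_or_ge s.length k with hgt | hle
    · rw [List.getElem?_eq_none (by omega : s.length ≤ k)] at hk2; simp at hk2
    · exact h3 k hk1 hle hk2

lemma pvCountGo (c : Char) (l : List Char) (fuel acc : Nat) (h : l.length ≤ fuel) :
    PySem.Chars.count.go [c] fuel l acc = acc + l.count c := by
  induction l generalizing fuel acc with
  | nil => cases fuel <;> simp [PySem.Chars.count.go]
  | cons x t ih =>
      cases fuel with
      | zero => simp at h
      | succ f =>
          rw [PySem.Chars.count.go]
          simp only [pvPrefixSingleton]
          by_cases hx : x = c
          · subst hx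
            simp only [List.getElem?_cons_zero, beq_self_eq_true, if_pos]
            rw [show List.drop [x].length (x :: t) = t by simp]
            rw [ih f (acc+1) (by simpa using h)]
            simp [List.count_cons]
            omega
          · rw [if_neg (by simp [hx])]
            rw [ih f acc (by simpa using h)]
            simp [List.count_cons, hx]

lemma pvCountSingleton (c : Char) (s : List Char) : PySem.Chars.count s [c] = s.count c := by
  unfold PySem.Chars.count
  rw [if_neg (by simp), pvCountGo c s s.length 0 (le_refl _)]
  omega

lemma pvReplaceGo (c : Char) (l acc : List Char) (fuel : Nat) (h : l.length ≤ fuel) :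
    PySem.Chars.replace.go [c] [] fuel l acc = acc.reverse ++ l.filter (fun x => !(x == c)) := by
  induction l generalizing fuel acc with
  | nil => cases fuel <;> simp [PySem.Chars.replace.go]
  | cons x t ih =>
      cases fuel with
      | zero => simp at h
      | succ f =>
          rw [PySem.Chars.replace.go]
          simp only [pvPrefixSingleton]
          by_cases hx : x = c
          · subst hx
            simp only [List.getElem?_cons_zero, beq_self_eq_true, if_pos]
            rw [show List.drop [x].length (x :: t) = t by simp]
            rw [show List.reverse ([] : List Char) ++ acc = acc by simp]
            rw [ih acc f (by simpa using h)]
            simp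
          · rw [if_neg (by simp [hx])]
            rw [ih (x :: acc) f (by simpa using h)]
            simp [hx]

lemma pvReplaceSingleton (c : Char) (s : List Char) :
    PySem.Chars.replace s [c] [] = s.filter (fun x => !(x == c)) := by
  unfold PySem.Chars.replace
  rw [if_neg (by simp), pvReplaceGo c s [] s.length (le_refl _)]
  simp

def pvSplit (c : Char) : List Char → List (List Char)
  | [] => [[]]
  | x :: t => if x = c then [] :: pvSplit c t else List.modifyHead (x :: ·) (pvSplit c t)

lemma pvSplit_ne_nil (c : Char) (l : List Char) : pvSplit c l ≠ [] := by
  induction l with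
  | nil => simp [pvSplit]
  | cons x t ih =>
      simp only [pvSplit]
      split
      · simp
      · cases hp : pvSplit c t with
        | nil => exact absurd hp ih
        | cons a b => simp [hp]

lemma pvSplitGo (c : Char) (l cur : List Char) (acc : List (List Char)) (fuel : Nat)
    (h : l.length < fuel) :
    PySem.Chars.splitOn.go [c] fuel l cur acc =
      acc.reverse ++ List.modifyHead (cur.reverse ++ ·) (pvSplit c l) := by
  induction l generalizing fuel cur acc with
  | nil =>
      cases fuel with
      | zero => omega
      | succ f => simp [PySem.Chars.splitOn.go, pvSplit]
  | cons x t ih =>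
      cases fuel with
      | zero => omega
      | succ f =>
          rw [PySem.Chars.splitOn.go]
          simp only [pvPrefixSingleton]
          by_cases hx : x = c
          · subst hx
            simp only [List.getElem?_cons_zero, beq_self_eq_true, if_pos]
            rw [show List.drop [x].length (x :: t) = t by simp]
            rw [ih [] (cur.reverse :: acc) f (by simpa using h)]
            cases hp : pvSplit x t with
            | nil => exact absurd hp (pvSplit_ne_nil x t)
            | cons a b => simp [pvSplit, hp]
          · rw [if_neg (by simp [hx])]
            rw [ih (x :: cur) acc f (by simpa using h)]
            simp only [pvSplit, if_neg hx]
            obtain ⟨hd, tl, he⟩ : ∃ hd tl, pvSplit c t = hd :: tl := by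
              cases hp : pvSplit c t with
              | nil => exact absurd hp (pvSplit_ne_nil c t)
              | cons a b => exact ⟨a, b, rfl⟩
            rw [he]
            simp

lemma pvSplitOnSingleton (c : Char) (s : List Char) :
    PySem.Chars.splitOn s [c] = pvSplit c s := by
  unfold PySem.Chars.splitOn
  rw [pvSplitGo c s [] [] (s.length + 1) (by omega)]
  obtain ⟨hd, tl, he⟩ : ∃ hd tl, pvSplit c s = hd :: tl := by
    cases hp : pvSplit c s with
    | nil => exact absurd hp (pvSplit_ne_nil c s)
    | cons a b => exact ⟨a, b, rfl⟩
  rw [he]; simp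

lemma pvSplit_length (c : Char) (l : List Char) : (pvSplit c l).length = l.count c + 1 := by
  induction l with
  | nil => simp [pvSplit]
  | cons x t ih =>
      simp only [pvSplit]
      by_cases hx : x = c
      · subst hx; simp [List.count_cons, ih]
      · rw [if_neg hx]
        rw [List.length_modifyHead]
        simp [List.count_cons, hx, ih]

lemma pvSplit_not_mem (c : Char) (l : List Char) (h : c ∉ l) : pvSplit c l = [l] := by
  induction l with
  | nil => rfl
  | cons x t ih =>
      simp only [pvSplit]
      rw [if_neg (by rintro rfl; exact h (List.mem_cons_self))]
      rw [ih (fun hm => h (List.mem_cons_of_mem _ hm))]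
      rfl

lemma pvSplit_append (c : Char) (u v : List Char) (h : c ∉ u) :
    pvSplit c (u ++ c :: v) = u :: pvSplit c v := by
  induction u with
  | nil => simp [pvSplit]
  | cons x u' ih =>
      simp only [List.cons_append, pvSplit]
      rw [if_neg (by rintro rfl; exact h (List.mem_cons_self))]
      rw [ih (fun hm => h (List.mem_cons_of_mem _ hm))]
      rfl

lemma pvIsInSingleton (c : Char) (s : List Char) : PySem.Chars.isIn [c] s = true ↔ c ∈ s := by
  rw [PySem.Chars.isIn_iff_infix]
  exact List.singleton_infix_iff c s

lemma pvFilterDel (c : Char) (hc : PySem.Chars.isdigit c = false) (l : List Char) :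
    (l.filter (fun x => !(x == c))).filter PySem.Chars.isdigit = l.filter PySem.Chars.isdigit := by
  induction l with
  | nil => rfl
  | cons x t ih =>
      by_cases hx : x = c
      · subst hx; simp [hc, ih]
      · simp only [List.filter_cons]
        rw [show (!(x == c)) = true by simp [hx]]
        simp only [if_true, List.filter_cons, ih]

lemma pvTail_all_append (w : List Char) (c : Char) (r : List Char)
    (hw : ∀ x ∈ w, PySem.Chars.isdigit x = true) (hc : PySem.Chars.isdigit c = false) :
    pvTail (w ++ c :: r) = w.length := by
  induction w with
  | nil => simp [pvTail, hc]
  | cons a t ih =>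
      simp only [List.cons_append, pvTail, hw a List.mem_cons_self, if_true]
      rw [ih (fun x hx => hw x (List.mem_cons_of_mem _ hx))]
      simp

-- cutting uf ++ v at (uf ++ v).length - v.length recovers uf and v
lemma pvCutAppend (uf v : List Char) :
    (uf ++ v).take ((uf ++ v).length - v.length) = uf ∧
    (uf ++ v).drop ((uf ++ v).length - v.length) = v := by
  have h : (uf ++ v).length - v.length = uf.length := by simp
  rw [h]
  exact ⟨List.take_left, List.drop_left⟩

-- B's value once the digit string is decomposed as uf ++ v and k evaluates to v.length
lemma pvB_cut (s uf v : List Char) (hs : s ≠ [])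
    (hdig : s.filter PySem.Chars.isdigit = uf ++ v)
    (hk : (if 0 < PySem.Chars.count s [','] ∧ 0 < PySem.Chars.count s ['.'] then pvTail s.reverse
           else if PySem.Chars.count s [','] + PySem.Chars.count s ['.'] = 1 ∧ pvTail s.reverse ≠ 3
                then pvTail s.reverse else 0) = v.length) :
    pvBCore s = String.mk ((if uf = [] then ['0'] else uf) ++ '.' :: (if v = [] then ['0', '0'] else v)) := by
  unfold pvBCore
  rw [if_neg hs]
  simp only [hdig, hk, (pvCutAppend uf v).1, (pvCutAppend uf v).2]

-- shared decomposition facts at the last-separator position m: s = u ++ s[m] :: v with v all digits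
lemma pvDropDigits (s : List Char) (hG : ∀ c ∈ s, pvNumChar c = true) (m : Nat)
    (hmc : ∀ k, m < k → s[k]? ≠ some ',') (hmd : ∀ k, m < k → s[k]? ≠ some '.') :
    ∀ x ∈ s.drop (m+1), PySem.Chars.isdigit x = true := by
  intro x hx
  obtain ⟨i, hi, hxe⟩ := List.getElem_of_mem hx
  have hxs : s[m+1+i]? = some x := by
    rw [← List.getElem?_drop, List.getElem?_eq_getElem hi, hxe]
  have hnum := hG x (List.mem_of_getElem? hxs)
  simp only [pvNumChar, Bool.or_eq_true, beq_iff_eq] at hnum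
  rcases hnum with (h1 | h2) | h3
  · exact h1
  · exact absurd (h2 ▸ hxs) (hmc (m+1+i) (by omega))
  · exact absurd (h3 ▸ hxs) (hmd (m+1+i) (by omega))

theorem pvCoreEq (s : List Char) (hG : ∀ c ∈ s, pvNumChar c = true) : pvACore s = pvBCore s := by
  by_cases hs : s = []
  · subst hs; rfl
  unfold pvACore
  rw [if_neg hs]
  by_cases hc : ',' ∈ s <;> by_cases hd : '.' ∈ s
  · -- both separators present
    obtain ⟨nc, hrc, hsc, hmc⟩ := pvRfind_mem ',' s hc
    obtain ⟨nd, hrd, hsd, hmd⟩ := pvRfind_mem '.' s hd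
    have hne : nc ≠ nd := by
      intro h; rw [h, hsd] at hsc; exact absurd (Option.some.inj hsc) (by decide)
    set m := max nc nd with hm
    have hsm : s[m]? = some ',' ∨ s[m]? = some '.' := by
      rcases Nat.lt_or_ge nd nc with h | h
      · left; rw [show m = nc by omega]; exact hsc
      · right; rw [show m = nd by omega]; exact hsd
    have hm_lt : m < s.length := by
      rcases hsm with h | h <;> exact (List.getElem?_eq_some_iff.mp h).1
    have hgm_nd : PySem.Chars.isdigit (s[m]'hm_lt) = false := by
      rcases hsm with h | h <;>
        (rw [List.getElem?_eq_getElem hm_lt] at h; rw [Option.some.inj h]; decide)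
    set u := s.take m with hu
    set v := s.drop (m+1) with hv
    have hdec : s = u ++ (s[m]'hm_lt) :: v := by
      conv_lhs => rw [← List.take_append_drop m s]
      rw [List.drop_eq_getElem_cons hm_lt]
    have hvd : ∀ x ∈ v, PySem.Chars.isdigit x = true :=
      pvDropDigits s hG m (fun k hk => hmc k (by omega)) (fun k hk => hmd k (by omega))
    have htail : pvTail s.reverse = v.length := by
      have hrev : s.reverse = v.reverse ++ (s[m]'hm_lt) :: u.reverse := by
        conv_lhs => rw [hdec]
        simp
      rw [hrev, pvTail_all_append _ _ _ (fun x hx => hvd x (List.mem_reverse.mp hx)) hgm_nd]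
      simp
    have hdig : s.filter PySem.Chars.isdigit = u.filter PySem.Chars.isdigit ++ v := by
      conv_lhs => rw [hdec]
      simp [List.filter_append, List.filter_cons, hgm_nd, List.filter_eq_self.mpr hvd]
    rw [pvB_cut s (u.filter PySem.Chars.isdigit) v hs hdig
      (by rw [if_pos ⟨by rw [pvCountSingleton]; exact List.count_pos_iff.mpr hc,
                by rw [pvCountSingleton]; exact List.count_pos_iff.mpr hd⟩, htail])]
    simp only [(pvIsInSingleton ',' s).mpr hc, (pvIsInSingleton '.' s).mpr hd, hrc, hrd]
    norm_num
    have hidx : PySem.Chars.rfind s (if nd < nc then [','] else ['.']) = (m : Int) := by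
      rcases Nat.lt_or_ge nd nc with h | h
      · rw [if_pos h, hrc]; congr 1; omega
      · rw [if_neg (by omega), hrd]; congr 1; omega
    rw [hidx]
    have hslice1 : PySem.List.slice s none (some ((m : Int))) = u := by
      rw [PySem.List.slice_to s (by omega)]
      simp [hu]
    have hslice2 : PySem.List.slice s (some ((m : Int) + 1)) none = v := by
      rw [show ((m : Int) + 1) = ((m + 1 : Nat) : Int) by push_cast; ring]
      rw [PySem.List.slice_from s (by omega)]
      simp [hv]
    rw [hslice1, hslice2]
    unfold pvAssemble
    simp only [pvReplaceSingleton, pvFilterDel '.' (by decide), pvFilterDel ',' (by decide),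
      List.filter_eq_self.mpr hvd]
    simp [List.filter_eq_nil_iff]
  · -- only ',' present
    obtain ⟨nc, hrc, hsc, hmc⟩ := pvRfind_mem ',' s hc
    have hnc_lt : nc < s.length := (List.getElem?_eq_some_iff.mp hsc).1
    have hgnc : s[nc] = ',' := by
      rw [List.getElem?_eq_getElem hnc_lt] at hsc; exact Option.some.inj hsc
    set u := s.take nc with hu
    set v := s.drop (nc+1) with hv
    have hdec : s = u ++ ',' :: v := by
      conv_lhs => rw [← List.take_append_drop nc s]
      rw [List.drop_eq_getElem_cons hnc_lt, hgnc]
    have hvd : ∀ x ∈ v, PySem.Chars.isdigit x = true :=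
      pvDropDigits s hG nc hmc (fun k _ h => hd (List.mem_of_getElem? h))
    have htail : pvTail s.reverse = v.length := by
      have hrev : s.reverse = v.reverse ++ ',' :: u.reverse := by
        conv_lhs => rw [hdec]
        simp
      rw [hrev, pvTail_all_append _ _ _ (fun x hx => hvd x (List.mem_reverse.mp hx)) (by decide)]
      simp
    have hdig : s.filter PySem.Chars.isdigit = u.filter PySem.Chars.isdigit ++ v := by
      conv_lhs => rw [hdec]
      simp [List.filter_append, List.filter_cons, List.filter_eq_self.mpr hvd,
        show PySem.Chars.isdigit ',' = false by decide]
    have hcount : s.count ',' = u.count ',' + 1 + v.count ',' := by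
      conv_lhs => rw [hdec]
      simp [List.count_append]
      omega
    have hdcnt : s.count '.' = 0 := List.count_eq_zero.mpr hd
    have hdF : PySem.Chars.isIn ['.'] s = false := by
      rw [PySem.Chars.isIn_eq_false_iff, List.singleton_infix_iff]; exact hd
    by_cases hk : 1 < s.count ','
    · rw [pvB_cut s (s.filter PySem.Chars.isdigit) [] hs (by simp)
        (by rw [pvCountSingleton, pvCountSingleton, hdcnt]
            rw [if_neg (by simp), if_neg (by omega)]
            rfl)]
      simp only [(pvIsInSingleton ',' s).mpr hc, hdF]
      norm_num
      rw [pvSplitOnSingleton, if_pos (show 2 < (pvSplit ',' s).length by rw [pvSplit_length]; omega)]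
      unfold pvAssemble
      simp only [pvReplaceSingleton, pvFilterDel ',' (by decide)]
      simp [List.filter_eq_nil_iff]
    · have hk1 : s.count ',' = 1 := by
        have : 0 < s.count ',' := List.count_pos_iff.mpr hc
        omega
      have hcu : ',' ∉ u := List.count_eq_zero.mp (by omega)
      have hcv : ',' ∉ v := List.count_eq_zero.mp (by omega)
      have hparts : pvSplit ',' s = [u, v] := by
        rw [hdec, pvSplit_append ',' u v hcu, pvSplit_not_mem ',' v hcv]
      by_cases hv3 : v.length = 3
      · rw [pvB_cut s (s.filter PySem.Chars.isdigit) [] hs (by simp)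
          (by rw [pvCountSingleton, pvCountSingleton, hdcnt]
              rw [if_neg (by simp), if_neg (by simp [htail, hv3])]
              rfl)]
        simp only [(pvIsInSingleton ',' s).mpr hc, hdF]
        norm_num
        rw [pvSplitOnSingleton, hparts]
        simp only [List.length_cons, List.length_nil, List.getElem?_cons_zero,
          List.getElem?_cons_succ, Option.getD_some]
        rw [if_neg (by omega)]
        have hvne : v ≠ [] := by
          intro h; rw [h] at hv3; simp at hv3
        have hstr : PySem.Chars.strIsdigit v = true := by
          simp [PySem.Chars.strIsdigit, List.all_eq_true, hvne]
          exact hvd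
        rw [if_pos ⟨hv3, hstr⟩]
        unfold pvAssemble
        have hips : List.filter PySem.Chars.isdigit (u ++ v) = List.filter PySem.Chars.isdigit s := by
          rw [hdig, List.filter_append, List.filter_eq_self.mpr hvd]
        simp only [hips, List.filter_nil]
        simp [List.filter_eq_nil_iff]
      · rw [pvB_cut s (u.filter PySem.Chars.isdigit) v hs hdig
          (by rw [pvCountSingleton, pvCountSingleton, hdcnt]
              rw [if_neg (by simp), if_pos ⟨by omega, by rw [htail]; exact hv3⟩]
              exact htail)]
        simp only [(pvIsInSingleton ',' s).mpr hc, hdF]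
        norm_num
        rw [pvSplitOnSingleton, hparts]
        simp only [List.length_cons, List.length_nil, List.getElem?_cons_zero,
          List.getElem?_cons_succ, Option.getD_some]
        rw [if_neg (by omega), if_neg (by intro hb; exact hv3 hb.1)]
        unfold pvAssemble
        simp only [pvReplaceSingleton, pvFilterDel ',' (by decide), List.filter_eq_self.mpr hvd]
        simp [List.filter_eq_nil_iff]
  · -- only '.' present
    obtain ⟨nc, hrc, hsc, hmc⟩ := pvRfind_mem '.' s hd
    have hnc_lt : nc < s.length := (List.getElem?_eq_some_iff.mp hsc).1
    have hgnc : s[nc] = '.' := by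
      rw [List.getElem?_eq_getElem hnc_lt] at hsc; exact Option.some.inj hsc
    set u := s.take nc with hu
    set v := s.drop (nc+1) with hv
    have hdec : s = u ++ '.' :: v := by
      conv_lhs => rw [← List.take_append_drop nc s]
      rw [List.drop_eq_getElem_cons hnc_lt, hgnc]
    have hvd : ∀ x ∈ v, PySem.Chars.isdigit x = true :=
      pvDropDigits s hG nc (fun k _ h => hc (List.mem_of_getElem? h)) hmc
    have htail : pvTail s.reverse = v.length := by
      have hrev : s.reverse = v.reverse ++ '.' :: u.reverse := by
        conv_lhs => rw [hdec]
        simp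
      rw [hrev, pvTail_all_append _ _ _ (fun x hx => hvd x (List.mem_reverse.mp hx)) (by decide)]
      simp
    have hdig : s.filter PySem.Chars.isdigit = u.filter PySem.Chars.isdigit ++ v := by
      conv_lhs => rw [hdec]
      simp [List.filter_append, List.filter_cons, List.filter_eq_self.mpr hvd,
        show PySem.Chars.isdigit '.' = false by decide]
    have hcount : s.count '.' = u.count '.' + 1 + v.count '.' := by
      conv_lhs => rw [hdec]
      simp [List.count_append]
      omega
    have hccnt : s.count ',' = 0 := List.count_eq_zero.mpr hc
    have hcF : PySem.Chars.isIn [','] s = false := by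
      rw [PySem.Chars.isIn_eq_false_iff, List.singleton_infix_iff]; exact hc
    by_cases hk : 1 < s.count '.'
    · rw [pvB_cut s (s.filter PySem.Chars.isdigit) [] hs (by simp)
        (by rw [pvCountSingleton, pvCountSingleton, hccnt]
            rw [if_neg (by simp), if_neg (by omega)]
            rfl)]
      simp only [(pvIsInSingleton '.' s).mpr hd, hcF]
      norm_num
      rw [pvSplitOnSingleton, if_pos (show 2 < (pvSplit '.' s).length by rw [pvSplit_length]; omega)]
      unfold pvAssemble
      simp only [pvReplaceSingleton, pvFilterDel '.' (by decide)]
      simp [List.filter_eq_nil_iff]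
    · have hk1 : s.count '.' = 1 := by
        have : 0 < s.count '.' := List.count_pos_iff.mpr hd
        omega
      have hcu : '.' ∉ u := List.count_eq_zero.mp (by omega)
      have hcv : '.' ∉ v := List.count_eq_zero.mp (by omega)
      have hparts : pvSplit '.' s = [u, v] := by
        rw [hdec, pvSplit_append '.' u v hcu, pvSplit_not_mem '.' v hcv]
      by_cases hv3 : v.length = 3
      · rw [pvB_cut s (s.filter PySem.Chars.isdigit) [] hs (by simp)
          (by rw [pvCountSingleton, pvCountSingleton, hccnt]
              rw [if_neg (by simp), if_neg (by simp [htail, hv3])]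
              rfl)]
        simp only [(pvIsInSingleton '.' s).mpr hd, hcF]
        norm_num
        rw [pvSplitOnSingleton, hparts]
        simp only [List.length_cons, List.length_nil, List.getElem?_cons_zero,
          List.getElem?_cons_succ, Option.getD_some]
        rw [if_neg (by omega)]
        have hvne : v ≠ [] := by
          intro h; rw [h] at hv3; simp at hv3
        have hstr : PySem.Chars.strIsdigit v = true := by
          simp [PySem.Chars.strIsdigit, List.all_eq_true, hvne]
          exact hvd
        rw [if_pos ⟨hv3, hstr⟩]
        unfold pvAssemble
        have hips : List.filter PySem.Chars.isdigit (u ++ v) = List.filter PySem.Chars.isdigit s := by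
          rw [hdig, List.filter_append, List.filter_eq_self.mpr hvd]
        simp only [hips, List.filter_nil]
        simp [List.filter_eq_nil_iff]
      · rw [pvB_cut s (u.filter PySem.Chars.isdigit) v hs hdig
          (by rw [pvCountSingleton, pvCountSingleton, hccnt]
              rw [if_neg (by simp), if_pos ⟨by omega, by rw [htail]; exact hv3⟩]
              exact htail)]
        simp only [(pvIsInSingleton '.' s).mpr hd, hcF]
        norm_num
        rw [pvSplitOnSingleton, hparts]
        simp only [List.length_cons, List.length_nil, List.getElem?_cons_zero,
          List.getElem?_cons_succ, Option.getD_some]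
        rw [if_neg (by omega), if_neg (by intro hb; exact hv3 hb.1)]
        unfold pvAssemble
        simp only [pvReplaceSingleton, pvFilterDel '.' (by decide), List.filter_eq_self.mpr hvd]
        simp [List.filter_eq_nil_iff]
  · -- no separator at all
    rw [pvB_cut s (s.filter PySem.Chars.isdigit) [] hs (by simp)
      (by rw [pvCountSingleton, pvCountSingleton, List.count_eq_zero.mpr hc, List.count_eq_zero.mpr hd]
          simp)]
    have hcF : PySem.Chars.isIn [','] s = false := by
      rw [PySem.Chars.isIn_eq_false_iff, List.singleton_infix_iff]; exact hc
    have hdF : PySem.Chars.isIn ['.'] s = false := by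
      rw [PySem.Chars.isIn_eq_false_iff, List.singleton_infix_iff]; exact hd
    simp only [hcF, hdF]
    unfold pvAssemble
    simp [List.filter_eq_nil_iff]

-- ===== VERDICT (by name: the statement is the Claim_ definition above) =====
theorem fn_amount_normalize_py_spec : Claim_equal_fn_amount_normalize_py := by
  intro raw _
  unfold Spec_fn_amount_normalize_py
  cases raw with
  | none => rfl
  | some r =>
      unfold fn_amount_normalize_py fn_amount_normalize_py_alt
      exact pvCoreEq _ (fun c hc => (List.mem_filter.mp hc).2)
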